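-- pv_equiv track=rewrite | github.com/acgrafton/coding_challenges | quip.py | asterisk
-- ===== SOURCE A (Python) =====
-- def asterisk(word):
--     """Return a word in asterisks leaving punctuation intact."""
--
--     punctuation = '!\"#$%&\'()+, -./:;<=>?@[\]^_`{|}~'
--     censored = []
--
--     #Loop through each character in the word, if it's a punctuation, leave in place, otherwise, replace with a *.
--     for char in word:
--         if char in punctuation:
--             censored.append(char)
--         else:
--             censored.append('*')
--
--     return "".join(censored)
-- ===== SOURCE B (Python) =====
-- def asterisk(word):
--     """Return a word in asterisks leaving punctuation intact."""
--     punctuation = '!\"#$%&\'()+, -./:;<=>?@[\]^_`{|}~'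
--     pieces = []
--     i = 0
--     n = len(word)
--     while i < n:
--         j = i
--         if word[i] in punctuation:
--             while j < n and word[j] in punctuation:
--                 j += 1
--             pieces.append(word[i:j])
--         else:
--             while j < n and word[j] not in punctuation:
--                 j += 1
--             pieces.append('*' * (j - i))
--         i = j
--     return ''.join(pieces)
-- ===== Notes on version B (the rewrite author's own statement) =====
-- stated objective: alternative
-- what changed: Replaces A's per-character test-and-append loop with a two-pointer run scanner that copies each maximal punctuation run as a slice and emits an asterisk string of the run's length for each maximal non-punctuation run, joining the pieces at the end.
import Mathlib
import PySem

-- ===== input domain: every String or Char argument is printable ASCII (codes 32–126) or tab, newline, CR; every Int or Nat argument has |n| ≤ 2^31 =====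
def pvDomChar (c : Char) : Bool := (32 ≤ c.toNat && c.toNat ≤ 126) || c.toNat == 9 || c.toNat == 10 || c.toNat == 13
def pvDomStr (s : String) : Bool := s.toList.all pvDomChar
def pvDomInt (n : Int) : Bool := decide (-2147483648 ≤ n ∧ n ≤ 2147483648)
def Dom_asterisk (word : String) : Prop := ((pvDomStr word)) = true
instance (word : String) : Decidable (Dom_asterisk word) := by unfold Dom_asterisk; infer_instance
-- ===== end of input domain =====

-- B replaces A's per-character test-and-append loop with a two-pointer run scanner:
-- it copies each maximal punctuation run as a slice and emits '*'*(run length) for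
-- each maximal non-punctuation run; objective: alternative, same cost.

-- ===== PORT A =====
def asterisk (word : String) : String :=
  let punctuation : String := "!\"#$%&'()+, -./:;<=>?@[\\]^_`{|}~"
  let censored : List String := word.toList.foldl
    (fun acc char =>
      if PySem.Str.isIn (String.ofList [char]) punctuation then acc ++ [String.ofList [char]]
      else acc ++ ["*"]) []
  PySem.Str.join "" censored

-- ===== PORT B =====
-- B's outer while loop advances run by run: the inner 'while j < n and word[j] in/not in
-- punctuation: j += 1' scans a maximal run (= takeWhile/dropWhile on the remaining suffix),
-- word[i:j] is that run as a slice, and '*' * (j - i) is one '*' per character of the run.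
def asteriskAltGo (p : List Char) : List Char → List String → List String
  | [], pieces => pieces
  | c :: rest, pieces =>
    if h : p.contains c then
      asteriskAltGo p ((c :: rest).dropWhile p.contains)
        (pieces ++ [String.ofList ((c :: rest).takeWhile p.contains)])
    else
      asteriskAltGo p ((c :: rest).dropWhile (fun x => !p.contains x))
        (pieces ++ [String.ofList (((c :: rest).takeWhile (fun x => !p.contains x)).map (fun _ => '*'))])
  termination_by cs => cs.length
  decreasing_by
  · simp only [List.dropWhile_cons, h, if_true]
    exact Nat.lt_succ_of_le (List.length_dropWhile_le _ _)
  · simp only [List.dropWhile_cons, h, Bool.not_false, if_true]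
    exact Nat.lt_succ_of_le (List.length_dropWhile_le _ _)

def asterisk_alt (word : String) : String :=
  let punctuation : String := "!\"#$%&'()+, -./:;<=>?@[\\]^_`{|}~"
  PySem.Str.join "" (asteriskAltGo punctuation.toList word.toList [])

-- ===== PRECONDITION & SPEC =====
def Spec_asterisk (word : String) (out : String) : Prop := out = asterisk_alt word
instance (word : String) (out : String) : Decidable (Spec_asterisk word out) := by unfold Spec_asterisk; infer_instance

-- ===== CLAIM (what is proved, stated in full; the proofs are below) =====
def Claim_equal_asterisk : Prop := ∀ (word : String), Dom_asterisk word → Spec_asterisk word (asterisk word)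

-- ===== LEMMAS AND PROOFS =====

-- membership of a one-character string in a string is membership of the character
theorem pv_isIn_single (c : Char) (s : String) :
    PySem.Str.isIn (String.ofList [c]) s = s.toList.contains c := by
  have hm : (String.ofList [c]).toList = [c] := by simp
  have h1 : PySem.Str.isIn (String.ofList [c]) s = true ↔ c ∈ s.toList := by
    rw [PySem.Str.isIn_iff_infix, hm]
    constructor
    · intro h
      exact List.singleton_sublist.mp h.sublist
    · intro h
      obtain ⟨pre, suf, hps⟩ := List.append_of_mem h
      exact ⟨pre, suf, by rw [hps]; simp⟩
  by_cases h : c ∈ s.toList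
  · rw [h1.mpr h]; simp [h]
  · have h2 : PySem.Str.isIn (String.ofList [c]) s = false := by
      cases hb : PySem.Str.isIn (String.ofList [c]) s
      · rfl
      · exact absurd (h1.mp hb) h
    rw [h2]; simp [h]

-- A's loop appends, in order, the kept-or-starred one-character strings
theorem pv_foldl_censored (P : String) (l : List Char) :
    ∀ (acc : List String),
      l.foldl (fun acc char =>
        if P.toList.contains char then acc ++ [String.ofList [char]]
        else acc ++ ["*"]) acc
      = acc ++ l.map (fun c => String.ofList [if P.toList.contains c then c else '*']) := by
  induction l with
  | nil => intro acc; simp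
  | cons c t ih =>
    intro acc
    rw [List.foldl_cons, List.map_cons]
    cases h : P.toList.contains c
    · rw [if_neg (by simp), ih]; simp
    · rw [if_pos rfl, ih]; simp

-- "".join of one-character strings is String.ofList of the characters
theorem pv_join_singletons (g : Char → Char) (l : List Char) :
    PySem.Str.join "" (l.map (fun c => String.ofList [g c])) = String.ofList (l.map g) := by
  apply String.toList_inj.mp
  rw [PySem.Str.toList_join]
  have h1 : (l.map (fun c => String.ofList [g c])).map String.toList
      = (l.map g).map (fun c => [c]) := by
    simp [List.map_map, Function.comp]
  simp only [h1]
  have h2 : ("" : String).toList = [] := rfl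
  rw [h2, PySem.Chars.join_nil_singletons, String.toList_ofList]

-- joining with the empty separator flattens the pieces
theorem pv_join_nil_flatten (parts : List (List Char)) :
    PySem.Chars.join [] parts = parts.flatten := by
  induction parts with
  | nil => simp [PySem.Chars.join_nil]
  | cons p rest ih =>
    cases rest with
    | nil => simp [PySem.Chars.join_singleton]
    | cons q t => rw [PySem.Chars.join_cons_cons, ih]; simp

-- unfolding equations for B's run scanner
theorem pv_go_cons_pos (p : List Char) (c : Char) (rest : List Char) (pieces : List String)
    (h : p.contains c = true) :
    asteriskAltGo p (c :: rest) pieces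
      = asteriskAltGo p ((c :: rest).dropWhile p.contains)
          (pieces ++ [String.ofList ((c :: rest).takeWhile p.contains)]) := by
  rw [asteriskAltGo]
  rw [dif_pos h]

theorem pv_go_cons_neg (p : List Char) (c : Char) (rest : List Char) (pieces : List String)
    (h : ¬ p.contains c = true) :
    asteriskAltGo p (c :: rest) pieces
      = asteriskAltGo p ((c :: rest).dropWhile (fun x => !p.contains x))
          (pieces ++ [String.ofList (((c :: rest).takeWhile
              (fun x => !p.contains x)).map (fun _ => '*'))]) := by
  rw [asteriskAltGo]
  rw [dif_neg h]

-- B's run scanner produces, flattened, exactly the per-character censored list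
theorem pv_go_spec (p : List Char) :
    ∀ (n : ℕ) (cs : List Char), cs.length ≤ n → ∀ (pieces : List String),
      ((asteriskAltGo p cs pieces).map String.toList).flatten
        = (pieces.map String.toList).flatten
          ++ cs.map (fun c => if p.contains c then c else '*') := by
  intro n
  induction n with
  | zero =>
    intro cs hlen pieces
    have : cs = [] := List.eq_nil_of_length_eq_zero (Nat.le_zero.mp hlen)
    subst this
    simp [asteriskAltGo]
  | succ n ih =>
    intro cs hlen pieces
    cases cs with
    | nil => simp [asteriskAltGo]
    | cons c rest =>
      by_cases h : p.contains c = true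
      · rw [pv_go_cons_pos p c rest pieces h]
        have hlen' : ((c :: rest).dropWhile p.contains).length ≤ n := by
          rw [List.dropWhile_cons_of_pos h]
          exact le_trans (List.length_dropWhile_le _ _) (Nat.le_of_succ_le_succ hlen)
        rw [ih _ hlen']
        have htw : ((c :: rest).takeWhile p.contains).map
            (fun c => if p.contains c then c else '*') = (c :: rest).takeWhile p.contains := by
          have hmem : ∀ x ∈ (c :: rest).takeWhile p.contains,
              (if p.contains x then x else '*') = x := by
            intro x hx
            rw [if_pos (List.mem_takeWhile_imp hx)]
          rw [List.map_congr_left hmem]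
          exact List.map_id _
        have hsplit : (c :: rest).map (fun c => if p.contains c then c else '*')
            = ((c :: rest).takeWhile p.contains).map (fun c => if p.contains c then c else '*')
              ++ ((c :: rest).dropWhile p.contains).map (fun c => if p.contains c then c else '*') := by
          rw [← List.map_append, List.takeWhile_append_dropWhile]
        rw [hsplit, htw]
        simp
      · rw [pv_go_cons_neg p c rest pieces h]
        have hb : (!p.contains c) = true := by
          simp at h
          simp [h]
        have hlen' : ((c :: rest).dropWhile (fun x => !p.contains x)).length ≤ n := by
          simp only [List.dropWhile_cons]
          rw [if_pos hb]
          exact le_trans (List.length_dropWhile_le _ _) (Nat.le_of_succ_le_succ hlen)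
        rw [ih _ hlen']
        have htw : ((c :: rest).takeWhile (fun x => !p.contains x)).map
            (fun c => if p.contains c then c else '*')
            = ((c :: rest).takeWhile (fun x => !p.contains x)).map (fun _ => '*') := by
          apply List.map_congr_left
          intro x hx
          have hx' := List.mem_takeWhile_imp hx
          rw [if_neg (by simpa using hx')]
        have hsplit : (c :: rest).map (fun c => if p.contains c then c else '*')
            = ((c :: rest).takeWhile (fun x => !p.contains x)).map
                (fun c => if p.contains c then c else '*')
              ++ ((c :: rest).dropWhile (fun x => !p.contains x)).map
                (fun c => if p.contains c then c else '*') := by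
          rw [← List.map_append, List.takeWhile_append_dropWhile]
        rw [hsplit, htw]
        simp

-- ===== VERDICT (by name: the statement is the Claim_ definition above) =====
theorem asterisk_spec : Claim_equal_asterisk := by
  intro word _
  unfold Spec_asterisk asterisk asterisk_alt
  dsimp only
  have hf : (fun (acc : List String) char =>
      if PySem.Str.isIn (String.ofList [char]) "!\"#$%&'()+, -./:;<=>?@[\\]^_`{|}~" then acc ++ [String.ofList [char]]
      else acc ++ ["*"])
      = (fun acc char =>
      if ("!\"#$%&'()+, -./:;<=>?@[\\]^_`{|}~" : String).toList.contains char then acc ++ [String.ofList [char]]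
      else acc ++ ["*"]) := by
    funext acc char
    rw [pv_isIn_single]
  rw [hf, pv_foldl_censored, List.nil_append, pv_join_singletons]
  apply String.toList_inj.mp
  rw [PySem.Str.toList_join]
  have h2 : ("" : String).toList = [] := rfl
  rw [h2, pv_join_nil_flatten,
    pv_go_spec _ word.toList.length word.toList le_rfl []]
  simp
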